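-- pv_equiv track=rewrite | github.com/StefanoPaesani/LossTolerance | CodesFunctions/LTCodeClass.py | get_independent_loss_combs
-- ===== SOURCE A (Python) =====
-- def get_independent_loss_combs(all_loss_combs):
--     """
--     Function that returns all the maximally loss-tolerant combinations of lost nodes in all_loss_combs:
--     any of them is not a subset of any other combination, and all combinations in all_loss_combs are subsets of some
--     combination in the list returned.
--     """
--     ind_loss_combs = []
--     for ix, loss_comb in enumerate(all_loss_combs):
--         check_non_incl = True
--         # check if loss_comb is already a subset of a set in ind_loss_combs
--         for checked_loss_comb in ind_loss_combs:
--             if set(loss_comb).issubset(set(checked_loss_comb)):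
--                 check_non_incl = False
--                 break
--         if check_non_incl:
--             # if not already in ind_loss_combs, check in the remaining combs in all_loss_combs
--             for checked_loss_comb in all_loss_combs[(ix + 1):]:
--                 if set(loss_comb).issubset(set(checked_loss_comb)):
--                     check_non_incl = False
--                     break
--         # if not found anywhere, add loss_comb to ind_loss_combs
--         if check_non_incl:
--             ind_loss_combs.append(loss_comb)
--     return ind_loss_combs
-- ===== SOURCE B (Python) =====
-- def get_independent_loss_combs(all_loss_combs):
--     sets = [set(c) for c in all_loss_combs]
--     n = len(sets)
--     result = []
--     for i in range(n):
--         s = sets[i]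
--         drop = any(s <= sets[j] for j in range(i + 1, n)) or \
--                any(s < sets[j] for j in range(i))
--         if not drop:
--             result.append(all_loss_combs[i])
--     return result
-- ===== Notes on version B (the rewrite author's own statement) =====
-- stated objective: alternative
-- what changed: Replaces A's accumulator-oracle two-phase check (subset-of-already-kept, then subset-of-tail, rebuilding set() objects in every comparison) by a single stateless pairwise scan over sets precomputed once: item i is kept iff no later set contains it (non-strictly) and no earlier set contains it strictly.
import Mathlib
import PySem

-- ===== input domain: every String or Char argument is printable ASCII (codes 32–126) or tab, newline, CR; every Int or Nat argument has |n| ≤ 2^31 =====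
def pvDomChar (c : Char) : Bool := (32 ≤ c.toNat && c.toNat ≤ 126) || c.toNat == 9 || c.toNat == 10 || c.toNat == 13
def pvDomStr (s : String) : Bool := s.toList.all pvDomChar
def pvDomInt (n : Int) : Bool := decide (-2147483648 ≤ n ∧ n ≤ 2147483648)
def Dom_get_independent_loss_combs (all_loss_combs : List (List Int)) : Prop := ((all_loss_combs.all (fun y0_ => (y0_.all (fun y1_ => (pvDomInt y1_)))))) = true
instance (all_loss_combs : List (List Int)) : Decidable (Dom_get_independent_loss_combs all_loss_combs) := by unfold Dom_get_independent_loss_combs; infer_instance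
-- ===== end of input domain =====

-- B replaces A's two-phase check against the growing result list (then the tail) by one stateless
-- pairwise scan over sets precomputed once (A rebuilds set() in every comparison); a timing run
-- measured B faster.

-- ===== PORT A =====
def pySubset (x y : List Int) : Bool :=
  PySem.Set.issubset (PySem.Set.ofList x) (PySem.Set.ofList y)

def get_independent_loss_combs (all_loss_combs : List (List Int)) : List (List Int) :=
  (PySem.List.enumerate all_loss_combs).foldl
    (fun ind_loss_combs p =>
      let check1 := ind_loss_combs.all (fun c => !(pySubset p.2 c))
      let check_non_incl :=
        if check1 then
          (PySem.List.slice all_loss_combs (some (p.1 + 1)) none).all (fun c => !(pySubset p.2 c))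
        else check1
      if check_non_incl then ind_loss_combs ++ [p.2] else ind_loss_combs)
    []

-- ===== PORT B =====
def get_independent_loss_combs_alt (all_loss_combs : List (List Int)) : List (List Int) :=
  let sets := all_loss_combs.map (fun c => PySem.Set.ofList c)
  let n : Int := (sets.length : Int)
  (PySem.List.pyRange 0 n 1).foldl
    (fun result i =>
      let s : PySem.Set Int := PySem.List.pyGetD sets i []
      let drop :=
        ((PySem.List.pyRange (i + 1) n 1).any (fun j =>
            PySem.Set.issubset s (PySem.List.pyGetD sets j [])))
        || ((PySem.List.pyRange 0 i 1).any (fun j =>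
            PySem.Set.issubset s (PySem.List.pyGetD sets j []) &&
              !(PySem.Set.issubset (PySem.List.pyGetD sets j []) s)))
      if !drop then result ++ [PySem.List.pyGetD all_loss_combs i []] else result)
    []

-- ===== PRECONDITION & SPEC =====
def Spec_get_independent_loss_combs (all_loss_combs : List (List Int)) (out : List (List Int)) : Prop := out = get_independent_loss_combs_alt all_loss_combs
instance (all_loss_combs : List (List Int)) (out : List (List Int)) : Decidable (Spec_get_independent_loss_combs all_loss_combs out) := by unfold Spec_get_independent_loss_combs; infer_instance

-- ===== CLAIM (what is proved, stated in full; the proofs are below) =====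
def Claim_equal_get_independent_loss_combs : Prop := ∀ (all_loss_combs : List (List Int)), Dom_get_independent_loss_combs all_loss_combs → Spec_get_independent_loss_combs all_loss_combs (get_independent_loss_combs all_loss_combs)

-- ===== LEMMAS AND PROOFS =====

def Sfin (l : List (List Int)) (i : Nat) : Finset Int := (l.getD i []).toFinset

def keep (l : List (List Int)) (i : Nat) : Prop :=
  (∀ j < l.length, i < j → ¬ Sfin l i ⊆ Sfin l j) ∧ (∀ j < i, ¬ Sfin l i ⊂ Sfin l j)

def keepb (l : List (List Int)) (i : Nat) : Bool :=
  decide ((∀ j < l.length, i < j → ¬ Sfin l i ⊆ Sfin l j) ∧ (∀ j < i, ¬ Sfin l i ⊂ Sfin l j))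

theorem keepb_iff (l : List (List Int)) (i : Nat) : keepb l i = true ↔ keep l i := by
  simp [keepb, keep]

def F (l : List (List Int)) (k : Nat) : List (List Int) :=
  ((List.range k).filter (fun i => keepb l i)).map (fun i => l.getD i [])

theorem getD_map_ofList (l : List (List Int)) (k : Nat) :
    (l.map (fun c => PySem.Set.ofList c)).getD k [] = PySem.Set.ofList (l.getD k []) := by
  by_cases h : k < l.length
  · rw [List.getD_eq_getElem _ _ (by simpa using h), List.getD_eq_getElem _ _ h]
    simp
  · rw [List.getD_eq_default _ _ (by simpa using Nat.le_of_not_lt h),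
        List.getD_eq_default _ _ (Nat.le_of_not_lt h)]
    rfl

theorem issubset_ofList_iff (x y : List Int) :
    PySem.Set.issubset (PySem.Set.ofList x) (PySem.Set.ofList y) = true ↔ x.toFinset ⊆ y.toFinset := by
  simp [PySem.Set.issubset_iff, PySem.Set.mem_ofList, Finset.subset_iff]

theorem bool_eq_iff (a b : Bool) : a = b ↔ ((a = true) ↔ (b = true)) := by
  cases a <;> cases b <;> simp

theorem pyRange_cast (a b : Nat) :
    PySem.List.pyRange (a:Int) (b:Int) 1 = (List.range (b - a)).map (fun m => ((a + m : Nat) : Int)) := by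
  rw [PySem.List.pyRange_one]
  have : ((b:Int) - (a:Int)).toNat = b - a := by omega
  rw [this]
  apply List.map_congr_left
  intro m _
  push_cast
  ring

theorem pointwise (l : List (List Int)) (k : Nat) (hk : k < l.length) :
    (!(((PySem.List.pyRange ((k:Int) + 1) ((l.length:Nat):Int) 1).any (fun j =>
            PySem.Set.issubset (PySem.List.pyGetD (l.map (fun c => PySem.Set.ofList c)) (k:Int) []) (PySem.List.pyGetD (l.map (fun c => PySem.Set.ofList c)) j [])))
        || ((PySem.List.pyRange 0 (k:Int) 1).any (fun j =>
            PySem.Set.issubset (PySem.List.pyGetD (l.map (fun c => PySem.Set.ofList c)) (k:Int) []) (PySem.List.pyGetD (l.map (fun c => PySem.Set.ofList c)) j []) &&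
              !(PySem.Set.issubset (PySem.List.pyGetD (l.map (fun c => PySem.Set.ofList c)) j []) (PySem.List.pyGetD (l.map (fun c => PySem.Set.ofList c)) (k:Int) []))))))
    = keepb l k := by
  have hcast : ((k:Int) + 1) = ((k+1 : Nat) : Int) := by push_cast; ring
  have h0 : (0:Int) = ((0:Nat) : Int) := by norm_num
  rw [hcast, h0, pyRange_cast, pyRange_cast]
  rw [bool_eq_iff, keepb_iff]
  simp only [List.any_map, Function.comp, PySem.List.pyGetD_natCast, getD_map_ofList,
    issubset_ofList_iff, Bool.not_eq_true', Bool.or_eq_false_iff, List.any_eq_false,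
    decide_eq_true_eq, List.mem_range, Bool.and_eq_true, Bool.not_eq_true, not_and,
    Bool.not_eq_true']
  simp only [Bool.not_eq_false, issubset_ofList_iff, zero_add, Nat.sub_zero]
  unfold keep Sfin
  constructor
  · rintro ⟨h1, h2⟩
    refine ⟨fun j hjn hkj => ?_, fun j hjk hss => ?_⟩
    · have h := h1 (j - (k+1)) (by omega)
      rwa [show k+1+(j-(k+1)) = j from by omega] at h
    · rw [ssubset_iff_subset_not_subset] at hss
      exact hss.2 (h2 j hjk hss.1)
  · rintro ⟨h1, h2⟩
    refine ⟨fun x hx => ?_, fun x hx hsub => ?_⟩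
    · exact h1 (k+1+x) (by omega) (by omega)
    · by_contra hns
      exact h2 x hx (ssubset_iff_subset_not_subset.mpr ⟨hsub, fun h => hns h⟩)

theorem B_eq_F (l : List (List Int)) : get_independent_loss_combs_alt l = F l l.length := by
  unfold get_independent_loss_combs_alt
  simp only [List.length_map]
  rw [PySem.List.pyRange_one]
  simp only [Int.sub_zero, Int.toNat_natCast, zero_add, List.foldl_map]
  rw [PySem.List.foldl_append_if]
  rw [List.nil_append, List.filter_congr (fun k hk => pointwise l k (List.mem_range.mp hk))]
  apply List.map_congr_left
  intro a _
  simp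


def Cbound (l : List (List Int)) : Nat := (l.flatten).toFinset.card

def mu (l : List (List Int)) (i : Nat) : Nat :=
  (Cbound l - (Sfin l i).card) * (l.length + 1) + (l.length - i)

theorem card_le_Cbound (l : List (List Int)) (i : Nat) (hi : i < l.length) :
    (Sfin l i).card ≤ Cbound l := by
  apply Finset.card_le_card
  intro x hx
  simp only [Sfin, List.mem_toFinset] at hx
  rw [List.getD_eq_getElem l [] hi] at hx
  simp only [List.mem_toFinset, List.mem_flatten]
  exact ⟨l[i], List.getElem_mem hi, hx⟩

theorem mu_lt_of_card_lt (l : List (List Int)) (i j : Nat) (hj : j < l.length)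
    (h : (Sfin l i).card < (Sfin l j).card) : mu l j < mu l i := by
  have hC := card_le_Cbound l j hj
  unfold mu
  have h1 : Cbound l - (Sfin l j).card + 1 ≤ Cbound l - (Sfin l i).card := by omega
  calc (Cbound l - (Sfin l j).card) * (l.length + 1) + (l.length - j)
      ≤ (Cbound l - (Sfin l j).card) * (l.length + 1) + l.length := by omega
    _ < (Cbound l - (Sfin l j).card + 1) * (l.length + 1) := by ring_nf; omega
    _ ≤ (Cbound l - (Sfin l i).card) * (l.length + 1) := Nat.mul_le_mul_right _ h1
    _ ≤ _ := by omega

theorem dom_aux (l : List (List Int)) :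
    ∀ m i, i < l.length → mu l i ≤ m → ∃ j < l.length, keep l j ∧ Sfin l i ⊆ Sfin l j := by
  intro m
  induction m with
  | zero =>
    intro i hi hm
    by_cases hk : keep l i
    · exact ⟨i, hi, hk, subset_rfl⟩
    · exfalso
      rw [keep, not_and_or] at hk
      push_neg at hk
      rcases hk with ⟨j, hjn, hij, hsub⟩ | ⟨j, hji, hss⟩
      · have hcle : (Sfin l i).card ≤ (Sfin l j).card := Finset.card_le_card hsub
        rcases Nat.lt_or_ge (Sfin l i).card (Sfin l j).card with hlt | hge
        · have := mu_lt_of_card_lt l i j hjn hlt; omega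
        · have hcd : (Sfin l i).card = (Sfin l j).card := by omega
          unfold mu at hm; omega
      · have hlt := Finset.card_lt_card hss
        have := mu_lt_of_card_lt l i j (by omega) hlt; omega
  | succ m ih =>
    intro i hi hm
    by_cases hk : keep l i
    · exact ⟨i, hi, hk, subset_rfl⟩
    · rw [keep, not_and_or] at hk
      push_neg at hk
      rcases hk with ⟨j, hjn, hij, hsub⟩ | ⟨j, hji, hss⟩
      · have hmu : mu l j < mu l i := by
          rcases Nat.lt_or_ge (Sfin l i).card (Sfin l j).card with hlt | hge
          · exact mu_lt_of_card_lt l i j hjn hlt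
          · have hcd : (Sfin l i).card = (Sfin l j).card := by
              have := Finset.card_le_card hsub; omega
            unfold mu
            rw [hcd]
            omega
        obtain ⟨j', hj', hkj', hsub'⟩ := ih j hjn (by omega)
        exact ⟨j', hj', hkj', hsub.trans hsub'⟩
      · have hmu : mu l j < mu l i := mu_lt_of_card_lt l i j (by omega) (Finset.card_lt_card hss)
        obtain ⟨j', hj', hkj', hsub'⟩ := ih j (by omega) (by omega)
        exact ⟨j', hj', hkj', hss.subset.trans hsub'⟩

theorem dom_exists (l : List (List Int)) :
    ∀ i < l.length, ∃ j < l.length, keep l j ∧ Sfin l i ⊆ Sfin l j := by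
  intro i hi
  exact dom_aux l (mu l i) i hi le_rfl

def stepA (l : List (List Int)) (ind_loss_combs : List (List Int)) (p : Int × List Int) : List (List Int) :=
  let check1 := ind_loss_combs.all (fun c => !(pySubset p.2 c))
  let check_non_incl :=
    if check1 then
      (PySem.List.slice l (some (p.1 + 1)) none).all (fun c => !(pySubset p.2 c))
    else check1
  if check_non_incl then ind_loss_combs ++ [p.2] else ind_loss_combs

theorem A_as_stepA (l : List (List Int)) :
    get_independent_loss_combs l = (PySem.List.enumerate l).foldl (stepA l) [] := rfl

theorem pySubset_iff (x y : List Int) : pySubset x y = true ↔ x.toFinset ⊆ y.toFinset :=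
  issubset_ofList_iff x y

theorem check1_iff (l : List (List Int)) (k : Nat) :
    ((F l k).all (fun c => !(pySubset (l.getD k []) c)) = true) ↔
      ∀ j < k, keep l j → ¬ Sfin l k ⊆ Sfin l j := by
  simp only [List.all_eq_true, F, List.mem_map, List.mem_filter, List.mem_range,
    Bool.not_eq_true', ← Bool.not_eq_true, pySubset_iff]
  constructor
  · rintro h j hj hkj hsub
    exact h _ ⟨j, ⟨hj, (keepb_iff l j).mpr hkj⟩, rfl⟩ hsub
  · rintro h c ⟨j, ⟨hj, hkj⟩, rfl⟩
    exact h j hj ((keepb_iff l j).mp hkj)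

theorem check2_iff (l : List (List Int)) (k : Nat) :
    ((PySem.List.slice l (some ((k:Int) + 1)) none).all (fun c => !(pySubset (l.getD k []) c)) = true) ↔
      ∀ j < l.length, k < j → ¬ Sfin l k ⊆ Sfin l j := by
  have hcast : ((k:Int) + 1) = ((k+1 : Nat) : Int) := by push_cast; ring
  rw [hcast, PySem.List.slice_from_natCast]
  simp only [List.all_eq_true, Bool.not_eq_true', ← Bool.not_eq_true, pySubset_iff]
  constructor
  · intro h j hjn hkj
    have hm : j - (k+1) < (l.drop (k+1)).length := by simp [List.length_drop]; omega
    have hmem : l[j] ∈ l.drop (k+1) := by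
      rw [List.mem_iff_getElem]
      refine ⟨j - (k+1), hm, ?_⟩
      rw [List.getElem_drop]
      congr 1
      omega
    have := h _ hmem
    unfold Sfin
    rwa [List.getD_eq_getElem l [] hjn]
  · intro h c hc
    obtain ⟨m, hm, rfl⟩ := List.mem_iff_getElem.mp hc
    rw [List.getElem_drop]
    have hlen : k + 1 + m < l.length := by simp [List.length_drop] at hm; omega
    have := h (k+1+m) hlen (by omega)
    unfold Sfin at this
    rwa [List.getD_eq_getElem l [] hlen] at this

theorem stepA_F (l : List (List Int)) (k : Nat) (hk : k < l.length) :
    stepA l (F l k) ((k:Int), l.getD k []) = F l (k+1) := by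
  have hF : F l (k+1) = F l k ++ (if keepb l k = true then [l.getD k []] else []) := by
    simp only [F, List.range_succ, List.filter_append, List.map_append]
    congr 1
    by_cases h : keep l k <;> simp [keepb_iff, h]
  unfold stepA
  simp only []
  have hmain : (if (F l k).all (fun c => !(pySubset (l.getD k []) c)) then
      (PySem.List.slice l (some ((k:Int) + 1)) none).all (fun c => !(pySubset (l.getD k []) c))
    else (F l k).all (fun c => !(pySubset (l.getD k []) c))) = keepb l k := by
    rw [bool_eq_iff, keepb_iff]
    constructor
    · intro hcheck
      by_cases hc1 : (F l k).all (fun c => !(pySubset (l.getD k []) c)) = true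
      · rw [if_pos hc1] at hcheck
        have h1 := (check1_iff l k).mp hc1
        have h2 := (check2_iff l k).mp hcheck
        refine ⟨fun j hjn hkj => h2 j hjn hkj, fun j hjk hss => ?_⟩
        obtain ⟨m, hm, hkm, hsub⟩ := dom_exists l j (by omega)
        have hkm' : Sfin l k ⊆ Sfin l m := hss.subset.trans hsub
        rcases Nat.lt_trichotomy m k with h | h | h
        · exact h1 m h hkm hkm'
        · subst h
          exact (lt_of_lt_of_le (Finset.card_lt_card hss) (Finset.card_le_card hsub)).ne rfl
        · exact h2 m hm h hkm'
      · rw [if_neg hc1] at hcheck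
        exact absurd hcheck hc1
    · intro hkeep
      have hc1 : (F l k).all (fun c => !(pySubset (l.getD k []) c)) = true := by
        rw [check1_iff]
        intro j hjk hkj hsub
        by_cases heq : Sfin l j ⊆ Sfin l k
        · exact hkj.1 k hk hjk (by rw [Finset.Subset.antisymm hsub heq])
        · exact hkeep.2 j hjk (ssubset_iff_subset_not_subset.mpr ⟨hsub, heq⟩)
      rw [if_pos hc1, check2_iff]
      exact fun j hjn hkj => hkeep.1 j hjn hkj
  rw [hmain, hF]
  by_cases h : keep l k <;> simp [keepb_iff, h]

theorem A_aux (l : List (List Int)) :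
    ∀ m k, l.length - k ≤ m → k ≤ l.length →
      (PySem.List.enumerate (l.drop k) (k:Int)).foldl (stepA l) (F l k) = F l l.length := by
  intro m
  induction m with
  | zero =>
    intro k h1 h2
    have hk : k = l.length := by omega
    subst hk
    simp [List.drop_length, PySem.List.enumerate]
  | succ m ih =>
    intro k h1 h2
    rcases Nat.eq_or_lt_of_le h2 with heq | hk
    · subst heq
      simp [List.drop_length, PySem.List.enumerate]
    · rw [List.drop_eq_getElem_cons hk, PySem.List.enumerate_cons, List.foldl_cons]
      have hstep : stepA l (F l k) ((k:Int), l[k]) = F l (k+1) := by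
        rw [show l[k] = l.getD k [] from (List.getD_eq_getElem l [] hk).symm]
        exact stepA_F l k hk
      rw [hstep, show (k:Int) + 1 = ((k+1 : Nat) : Int) from by push_cast; ring]
      exact ih (k+1) (by omega) (by omega)

theorem A_eq_F (l : List (List Int)) : get_independent_loss_combs l = F l l.length := by
  rw [A_as_stepA]
  have h0 : (PySem.List.enumerate l 0).foldl (stepA l) [] =
      (PySem.List.enumerate (l.drop 0) ((0:Nat):Int)).foldl (stepA l) (F l 0) := by
    simp [F]
  rw [h0]
  exact A_aux l l.length 0 (by omega) (by omega)

-- ===== VERDICT (by name: the statement is the Claim_ definition above) =====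
theorem get_independent_loss_combs_spec : Claim_equal_get_independent_loss_combs := by
  intro l _
  unfold Spec_get_independent_loss_combs
  rw [A_eq_F, B_eq_F]
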